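-- pv_equiv track=rewrite | github.com/amzn/augment-the-pairs-wacv2024 | text_conditioned_hflip.py | has_left_right_in_dict
-- ===== SOURCE A (Python) =====
-- left_right_dict = {
--     "left": {"left", "leftmost", "bottomleft", "leftside", "farleft", "leftest", "leftiest", "upleft", "leftier", "upperleft", "topleft", "lefty", "leftmiddle"},
--     "right": {"right", "rightmost", "bottomright", "rightside", "farright", "rightest", "rightiest", "upright", "rightier", "upperright", "topright", "righty", "rightmiddle"}
-- }
--
-- def is_letter(letter):
--     return letter>='a' and letter<='z'
--
-- def find_words(phrase):
--     phrase = phrase.lower() # lowercase only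
--     word_idxes = []
--     i = 0
--     left = i
--     while i <len(phrase):
--         if is_letter(phrase[i]):
--             i += 1
--             continue
--         if left != i:
--             word_idxes.append((left, i))
--         i += 1
--         left = i
--
--     if left != i:
--         word_idxes.append((left, i))
--
--     words = [phrase[l:r] for l,r in word_idxes]
--     return words
--
-- def has_left_right_in_dict(caption):
--     words = find_words(caption)
--     for word in words:
--         if 'left' in word:
--             if word in left_right_dict['left']:
--                 return True
--         if 'right' in word:
--             if word in left_right_dict['right']:
--                 return True
--     return False
-- ===== SOURCE B (Python) =====
-- LEFT_RIGHT_WORDS = frozenset({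
--     "left", "leftmost", "bottomleft", "leftside", "farleft", "leftest", "leftiest",
--     "upleft", "leftier", "upperleft", "topleft", "lefty", "leftmiddle",
--     "right", "rightmost", "bottomright", "rightside", "farright", "rightest", "rightiest",
--     "upright", "rightier", "upperright", "topright", "righty", "rightmiddle",
-- })
--
-- def has_left_right_in_dict(caption):
--     # Replace every non a-z character of the lowered caption by a space, split
--     # on whitespace, and test membership in the combined left+right word set.
--     cleaned = "".join(c if 'a' <= c <= 'z' else ' ' for c in caption.lower())
--     return any(w in LEFT_RIGHT_WORDS for w in cleaned.split())
-- ===== Notes on version B (the rewrite author's own statement) =====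
-- stated objective: simpler
-- what changed: Replaced the index-bookkeeping char loop (find_words) plus the two substring-guarded dict lookups by a one-liner: map non-letters of the lowered caption to spaces, str.split(), and membership in a single combined left+right word set (each set member already contains its guard substring, so the guards are redundant).
import Mathlib
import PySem

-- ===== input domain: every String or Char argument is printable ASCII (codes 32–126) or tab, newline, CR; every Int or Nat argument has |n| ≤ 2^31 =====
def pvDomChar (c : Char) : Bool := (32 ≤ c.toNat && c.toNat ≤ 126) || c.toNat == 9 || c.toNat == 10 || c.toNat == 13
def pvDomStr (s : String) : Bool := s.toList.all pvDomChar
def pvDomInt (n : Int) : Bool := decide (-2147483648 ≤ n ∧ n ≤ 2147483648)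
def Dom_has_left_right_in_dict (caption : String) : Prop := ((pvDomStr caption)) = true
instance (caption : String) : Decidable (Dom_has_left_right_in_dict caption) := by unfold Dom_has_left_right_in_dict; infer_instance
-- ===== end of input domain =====

-- B replaces A's index-tracking char-loop tokenizer and dual substring-guarded set lookups by
-- "map non-letters to spaces, split(), membership in the combined word set" (objective: simpler).

-- ===== PORT A =====
-- left_right_dict["left"] / ["right"] (Python sets; membership only, order immaterial)
def lr_left_set : List (List Char) :=
  ["left".toList, "leftmost".toList, "bottomleft".toList, "leftside".toList, "farleft".toList,
   "leftest".toList, "leftiest".toList, "upleft".toList, "leftier".toList, "upperleft".toList,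
   "topleft".toList, "lefty".toList, "leftmiddle".toList]

def lr_right_set : List (List Char) :=
  ["right".toList, "rightmost".toList, "bottomright".toList, "rightside".toList, "farright".toList,
   "rightest".toList, "rightiest".toList, "upright".toList, "rightier".toList, "upperright".toList,
   "topright".toList, "righty".toList, "rightmiddle".toList]

-- is_letter(letter): letter >= 'a' and letter <= 'z'
def lr_letter (c : Char) : Bool := decide ('a' ≤ c) && decide (c ≤ 'z')

-- the while-loop of find_words, recursing on the index i (state: i, left)
def find_words_loop (phrase : List Char) (i left : Nat) : List (Nat × Nat) :=
  if h : i < phrase.length then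
    if lr_letter phrase[i] then find_words_loop phrase (i + 1) left
    else if left ≠ i then (left, i) :: find_words_loop phrase (i + 1) (i + 1)
    else find_words_loop phrase (i + 1) (i + 1)
  else if left ≠ i then [(left, i)] else []
termination_by phrase.length - i

-- find_words(phrase): collect (left, i) index pairs, then slice them out
def find_words (phrase0 : List Char) : List (List Char) :=
  let phrase := PySem.Chars.lower phrase0
  (find_words_loop phrase 0 0).map
    (fun p => PySem.List.slice phrase (some (p.1 : Int)) (some (p.2 : Int)))

-- the 'for word in words' loop with its early returns
def check_words : List (List Char) → Bool
  | [] => false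
  | w :: ws =>
    if PySem.Chars.isIn "left".toList w && lr_left_set.contains w then true
    else if PySem.Chars.isIn "right".toList w && lr_right_set.contains w then true
    else check_words ws

def has_left_right_in_dict (caption : String) : Bool :=
  check_words (find_words caption.toList)

-- ===== PORT B =====
-- LEFT_RIGHT_WORDS: the combined left+right set
def lr_words : List (List Char) :=
  ["left".toList, "leftmost".toList, "bottomleft".toList, "leftside".toList, "farleft".toList,
   "leftest".toList, "leftiest".toList, "upleft".toList, "leftier".toList, "upperleft".toList,
   "topleft".toList, "lefty".toList, "leftmiddle".toList,
   "right".toList, "rightmost".toList, "bottomright".toList, "rightside".toList, "farright".toList,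
   "rightest".toList, "rightiest".toList, "upright".toList, "rightier".toList, "upperright".toList,
   "topright".toList, "righty".toList, "rightmiddle".toList]

def has_left_right_in_dict_alt (caption : String) : Bool :=
  let cleaned := (PySem.Chars.lower caption.toList).map
    (fun c => if 'a' ≤ c ∧ c ≤ 'z' then c else ' ')
  (PySem.Chars.split₀ cleaned).any (fun w => lr_words.contains w)

-- ===== PRECONDITION & SPEC =====
def Spec_has_left_right_in_dict (caption : String) (out : Bool) : Prop := out = has_left_right_in_dict_alt caption
instance (caption : String) (out : Bool) : Decidable (Spec_has_left_right_in_dict caption out) := by unfold Spec_has_left_right_in_dict; infer_instance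

-- ===== CLAIM (what is proved, stated in full; the proofs are below) =====
def Claim_equal_has_left_right_in_dict : Prop := ∀ (caption : String), Dom_has_left_right_in_dict caption → Spec_has_left_right_in_dict caption (has_left_right_in_dict caption)

-- ===== LEMMAS AND PROOFS =====

-- common characterisation of both tokenizers: maximal a-z runs, acc = pending partial word
def tok : List Char → List Char → List (List Char)
  | acc, [] => if acc = [] then [] else [acc]
  | acc, c :: rest =>
    if lr_letter c then tok (acc ++ [c]) rest
    else if acc = [] then tok [] rest else acc :: tok [] rest

theorem find_words_loop_tok (phrase : List Char) (i left : Nat)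
    (hle : left ≤ i) (hi : i ≤ phrase.length) :
    (find_words_loop phrase i left).map
      (fun p => (phrase.drop p.1).take (p.2 - p.1))
      = tok ((phrase.drop left).take (i - left)) (phrase.drop i) := by
  fun_induction find_words_loop phrase i left with
  | case1 i left h hlet ih =>
    rw [ih (by omega) (by omega)]
    rw [List.drop_eq_getElem_cons h]
    rw [tok]
    rw [if_pos hlet]
    congr 1
    have : i + 1 - left = (i - left) + 1 := by omega
    rw [this, List.take_add_one, List.getElem?_drop]
    have : left + (i - left) = i := by omega
    rw [this, List.getElem?_eq_getElem h]
    rfl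
  | case2 i left h hlet hne ih =>
    rw [List.map_cons, ih (by omega) (by omega)]
    rw [List.drop_eq_getElem_cons h, tok, if_neg hlet]
    have hacc : ((phrase.drop left).take (i - left)) ≠ [] := by
      have hlen : ((phrase.drop left).take (i - left)).length = i - left := by
        simp [List.length_take, List.length_drop]; omega
      intro hnil; rw [hnil] at hlen; simp at hlen; omega
    rw [if_neg hacc]
    simp
  | case3 i left h hlet heq ih =>
    rw [ih (by omega) (by omega)]
    have heq' : left = i := by omega
    subst heq'
    rw [List.drop_eq_getElem_cons h, tok, if_neg hlet]
    simp
  | case4 i left h hne =>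
    have hieq : i = phrase.length := by omega
    subst hieq
    rw [List.drop_length]
    have hlt : left < phrase.length := by omega
    have hdt : (phrase.drop left).take (phrase.length - left) = phrase.drop left := by
      apply List.take_of_length_le; simp
    rw [tok, hdt, if_neg (by simp; omega)]
    simp [hdt]
  | case5 i left h hne =>
    have heq' : left = i := by omega
    subst heq'
    have hieq : left = phrase.length := by omega
    subst hieq
    simp [tok]

theorem isspace_of_letter (c : Char) (h1 : 'a' ≤ c) (h2 : c ≤ 'z') :
    PySem.Chars.isspace c = false := by
  rw [Char.le_def] at h1 h2
  have h1' : 97 ≤ c.toNat := by exact_mod_cast h1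
  have h2' : c.toNat ≤ 122 := by exact_mod_cast h2
  simp only [PySem.Chars.isspace]
  simp only [Bool.or_eq_false_iff, Bool.and_eq_false_iff, decide_eq_false_iff_not]
  omega

theorem split₀_go_tok (phrase : List Char) (cur : List Char) (acc : List (List Char)) :
    PySem.Chars.split₀.go (phrase.map (fun c => if 'a' ≤ c ∧ c ≤ 'z' then c else ' ')) cur acc
      = acc.reverse ++ tok cur.reverse phrase := by
  induction phrase generalizing cur acc with
  | nil =>
    rw [List.map_nil, PySem.Chars.split₀.go, tok]
    by_cases hc : cur = []
    · subst hc; simp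
    · rw [if_neg (by simpa using hc), if_neg (by simpa using hc)]
      simp
  | cons c rest ih =>
    rw [List.map_cons, PySem.Chars.split₀.go]
    by_cases hl : 'a' ≤ c ∧ c ≤ 'z'
    · rw [if_pos hl, isspace_of_letter c hl.1 hl.2]
      simp only [Bool.false_eq_true, if_false]
      rw [ih (c :: cur) acc, tok, if_pos (by simp [lr_letter, hl.1, hl.2])]
      simp
    · rw [if_neg hl]
      have hsp : PySem.Chars.isspace ' ' = true := by decide
      rw [hsp]
      simp only [if_true]
      have hnl : lr_letter c = false := by
        simp only [lr_letter, Bool.and_eq_false_iff, decide_eq_false_iff_not]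
        by_cases h1 : 'a' ≤ c
        · right; intro h2; exact hl ⟨h1, h2⟩
        · left; exact h1
      by_cases hc : cur = []
      · subst hc
        simp only [List.isEmpty_nil, if_true]
        rw [ih [] acc, tok, hnl]
        simp
      · rw [if_neg (by simpa using hc)]
        rw [ih [] (cur.reverse :: acc), tok, hnl]
        simp only [Bool.false_eq_true, if_false]
        rw [if_neg (by simpa using hc)]
        simp

theorem word_head_eq (w : List Char) :
    ((PySem.Chars.isIn "left".toList w && lr_left_set.contains w)
      || (PySem.Chars.isIn "right".toList w && lr_right_set.contains w))
      = lr_words.contains w := by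
  have hsplit : lr_words.contains w = (lr_left_set.contains w || lr_right_set.contains w) := by
    simp [lr_words, lr_left_set, lr_right_set, List.contains_eq_mem]
    ac_rfl
  rw [hsplit]
  by_cases hL : w ∈ lr_left_set
  · fin_cases hL <;> decide
  · rw [(by simpa using hL : lr_left_set.contains w = false)]
    by_cases hR : w ∈ lr_right_set
    · fin_cases hR <;> decide
    · rw [(by simpa using hR : lr_right_set.contains w = false)]
      simp

theorem check_words_any (ws : List (List Char)) :
    check_words ws = ws.any (fun w => lr_words.contains w) := by
  induction ws with
  | nil => rfl
  | cons w ws ih =>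
    rw [check_words, List.any_cons, ← word_head_eq w, ← ih]
    cases h1 : (PySem.Chars.isIn "left".toList w && lr_left_set.contains w) <;>
      cases h2 : (PySem.Chars.isIn "right".toList w && lr_right_set.contains w) <;>
      simp

-- ===== VERDICT (by name: the statement is the Claim_ definition above) =====
theorem has_left_right_in_dict_spec : Claim_equal_has_left_right_in_dict := by
  intro caption _
  unfold Spec_has_left_right_in_dict has_left_right_in_dict has_left_right_in_dict_alt find_words
  simp only [PySem.Chars.split₀, split₀_go_tok, List.reverse_nil, List.nil_append]
  rw [check_words_any]
  have t1 := find_words_loop_tok (PySem.Chars.lower caption.toList) 0 0 (le_refl 0) (Nat.zero_le _)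
  simp only [Nat.sub_zero, List.drop_zero, List.take_zero] at t1
  rw [← t1]
  congr 1
  apply List.map_congr_left
  intro p _
  simp [PySem.List.slice_natCast]
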